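-- pv_equiv track=rewrite | github.com/vggm/Advent-of-Code | 2023/Day01/part_two.py | exists_in_spelled_digits
-- ===== SOURCE A (Python) =====
-- SPELLED_DIGITS = {
--   'one':    '1',
--   'two':    '2',
--   'three':  '3',
--   'four':   '4',
--   'five':   '5',
--   'six':    '6',
--   'seven':  '7',
--   'eight':  '8',
--   'nine':   '9'
-- }
--
-- def exists_in_spelled_digits ( sub_str: str, reverse=False ) -> bool:
--
--   if not reverse:
--     for digit in SPELLED_DIGITS.keys():
--       if digit.startswith(sub_str):
--         return True
--
--   else:
--     for digit in SPELLED_DIGITS.keys():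
--       if digit.endswith(sub_str):
--         return True
--
--   return False
-- ===== SOURCE B (Python) =====
-- SPELLED_DIGITS = {
--   'one':    '1',
--   'two':    '2',
--   'three':  '3',
--   'four':   '4',
--   'five':   '5',
--   'six':    '6',
--   'seven':  '7',
--   'eight':  '8',
--   'nine':   '9'
-- }
--
-- # Precomputed once at module load: every prefix / suffix (including '') of every spelled digit.
-- PREFIXES = {d[:i] for d in SPELLED_DIGITS for i in range(len(d) + 1)}
-- SUFFIXES = {d[len(d) - i:] for d in SPELLED_DIGITS for i in range(len(d) + 1)}
--
-- def exists_in_spelled_digits(sub_str: str, reverse=False) -> bool: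
--     return sub_str in (SUFFIXES if reverse else PREFIXES)
-- ===== Notes on version B (the rewrite author's own statement) =====
-- stated objective: faster
-- what changed: Replaces the per-call scan over the nine spelled digits with startswith/endswith tests by a single membership lookup in a prefix (resp. suffix) set precomputed once at module load.
import Mathlib
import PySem

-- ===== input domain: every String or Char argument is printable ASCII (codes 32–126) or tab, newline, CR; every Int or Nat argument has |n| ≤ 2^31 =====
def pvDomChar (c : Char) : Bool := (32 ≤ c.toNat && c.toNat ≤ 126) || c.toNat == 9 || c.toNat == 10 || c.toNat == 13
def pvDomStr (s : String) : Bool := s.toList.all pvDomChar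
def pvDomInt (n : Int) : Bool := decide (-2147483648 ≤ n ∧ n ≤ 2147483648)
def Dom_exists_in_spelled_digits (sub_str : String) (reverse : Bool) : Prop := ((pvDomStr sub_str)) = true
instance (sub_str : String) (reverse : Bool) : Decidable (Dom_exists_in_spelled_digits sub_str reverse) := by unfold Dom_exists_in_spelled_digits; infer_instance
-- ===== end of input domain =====

-- B replaces A's per-call scan over the nine spelled digits by one membership lookup
-- in a prefix/suffix table built once (objective: faster, constant-factor).

-- ===== PORT A =====
def SPELLED_DIGITS : PySem.Dict String String :=
  PySem.Dict.ofList
  [("one", "1"), ("two", "2"), ("three", "3"), ("four", "4"), ("five", "5"),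
   ("six", "6"), ("seven", "7"), ("eight", "8"), ("nine", "9")]

def exists_in_spelled_digits (sub_str : String) (reverse : Bool) : Bool :=
  if !reverse then
    (PySem.Dict.keys SPELLED_DIGITS).any (fun digit => PySem.Str.startswith digit sub_str)
  else
    (PySem.Dict.keys SPELLED_DIGITS).any (fun digit => PySem.Str.endswith digit sub_str)

-- ===== PORT B =====
def PREFIXES : PySem.Set String :=
  PySem.Set.ofList ((PySem.Dict.keys SPELLED_DIGITS).flatMap (fun d =>
    (List.range (d.toList.length + 1)).map (fun (i : Nat) => PySem.Str.slice d none (some (i : Int)))))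

def SUFFIXES : PySem.Set String :=
  PySem.Set.ofList ((PySem.Dict.keys SPELLED_DIGITS).flatMap (fun d =>
    (List.range (d.toList.length + 1)).map (fun (i : Nat) =>
      PySem.Str.slice d (some ((d.toList.length : Int) - (i : Int))) none)))

def exists_in_spelled_digits_alt (sub_str : String) (reverse : Bool) : Bool :=
  PySem.Set.contains (if reverse then SUFFIXES else PREFIXES) sub_str

-- ===== PRECONDITION & SPEC =====
def Spec_exists_in_spelled_digits (sub_str : String) (reverse : Bool) (out : Bool) : Prop := out = exists_in_spelled_digits_alt sub_str reverse
instance (sub_str : String) (reverse : Bool) (out : Bool) : Decidable (Spec_exists_in_spelled_digits sub_str reverse out) := by unfold Spec_exists_in_spelled_digits; infer_instance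

-- ===== CLAIM (what is proved, stated in full; the proofs are below) =====
def Claim_equal_exists_in_spelled_digits : Prop := ∀ (sub_str : String) (reverse : Bool), Dom_exists_in_spelled_digits sub_str reverse → Spec_exists_in_spelled_digits sub_str reverse (exists_in_spelled_digits sub_str reverse)

-- ===== LEMMAS AND PROOFS =====

-- membership in the precomputed prefix table ↔ "is a prefix of some spelled digit"
theorem mem_PREFIXES_iff (s : String) :
    s ∈ PREFIXES ↔ ∃ d ∈ PySem.Dict.keys SPELLED_DIGITS, s.toList <+: d.toList := by
  unfold PREFIXES
  rw [PySem.Set.mem_ofList]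
  rw [List.mem_flatMap]
  constructor
  · rintro ⟨d, hd, hmem⟩
    obtain ⟨i, hi, rfl⟩ := List.mem_map.mp hmem
    refine ⟨d, hd, ?_⟩
    rw [PySem.Str.toList_slice, PySem.Chars.slice_eq_listSlice,
        PySem.List.slice_to (b := (i : Int)) _ (by omega)]
    exact List.take_prefix _ _
  · rintro ⟨d, hd, hp⟩
    refine ⟨d, hd, List.mem_map.mpr ⟨s.toList.length,
      List.mem_range.mpr (by have := hp.length_le; omega), ?_⟩⟩
    apply String.toList_inj.mp
    rw [PySem.Str.toList_slice, PySem.Chars.slice_eq_listSlice,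
        PySem.List.slice_to (b := (s.toList.length : Int)) _ (by omega), Int.toNat_natCast]
    exact (List.prefix_iff_eq_take.mp hp).symm

-- membership in the precomputed suffix table ↔ "is a suffix of some spelled digit"
theorem mem_SUFFIXES_iff (s : String) :
    s ∈ SUFFIXES ↔ ∃ d ∈ PySem.Dict.keys SPELLED_DIGITS, s.toList <:+ d.toList := by
  unfold SUFFIXES
  rw [PySem.Set.mem_ofList]
  rw [List.mem_flatMap]
  constructor
  · rintro ⟨d, hd, hmem⟩
    obtain ⟨i, hi, rfl⟩ := List.mem_map.mp hmem
    have hi' := List.mem_range.mp hi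
    refine ⟨d, hd, ?_⟩
    rw [PySem.Str.toList_slice, PySem.Chars.slice_eq_listSlice,
        PySem.List.slice_from (a := (d.toList.length : Int) - (i : Int)) _ (by omega)]
    exact List.drop_suffix _ _
  · rintro ⟨d, hd, hp⟩
    have hle := hp.length_le
    refine ⟨d, hd, List.mem_map.mpr ⟨s.toList.length, List.mem_range.mpr (by omega), ?_⟩⟩
    apply String.toList_inj.mp
    rw [PySem.Str.toList_slice, PySem.Chars.slice_eq_listSlice,
        PySem.List.slice_from (a := (d.toList.length : Int) - (s.toList.length : Int)) _ (by omega)]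
    have : ((d.toList.length : Int) - (s.toList.length : Int)).toNat
        = d.toList.length - s.toList.length := by omega
    rw [this]
    exact (List.suffix_iff_eq_drop.mp hp).symm

theorem contains_eq_mem (t : PySem.Set String) (s : String) :
    PySem.Set.contains t s = true ↔ s ∈ t := by
  simp [PySem.Set.contains]

-- ===== VERDICT (by name: the statement is the Claim_ definition above) =====
theorem exists_in_spelled_digits_spec : Claim_equal_exists_in_spelled_digits := by
  intro sub_str reverse _
  unfold Spec_exists_in_spelled_digits exists_in_spelled_digits exists_in_spelled_digits_alt
  cases reverse
  · simp only [Bool.not_false, if_pos, Bool.false_eq_true, if_false]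
    rw [Bool.eq_iff_iff, contains_eq_mem, mem_PREFIXES_iff]
    simp only [List.any_eq_true, PySem.Str.startswith_eq, PySem.Chars.startswith_iff]
  · simp only [Bool.not_true, Bool.false_eq_true, if_false, ite_true]
    rw [Bool.eq_iff_iff, contains_eq_mem, mem_SUFFIXES_iff]
    simp only [List.any_eq_true, PySem.Str.endswith_eq, PySem.Chars.endswith_iff]
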